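-- pv_equiv track=rewrite | github.com/pbrook/aoc | 2022/17/main.py | s2n
-- ===== SOURCE A (Python) =====
-- def s2n(s):
--     n = 0
--     for i, c in enumerate(s):
--         if c == '#':
--             n |= 1 << i
--         else:
--             assert c == '.'
--     return n
-- ===== SOURCE B (Python) =====
-- def s2n(s):
--     n = 0
--     for c in reversed(s):
--         if c == '#':
--             n = 2 * n + 1
--         else:
--             assert c == '.'
--             n = 2 * n
--     return n
-- ===== Notes on version B (the rewrite author's own statement) =====
-- stated objective: alternative
-- what changed: Replaces OR-ing 1<<i at an enumerate index with Horner-style accumulation n=2n+bit over the reversed string, so no index or shifted mask is ever computed.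
import Mathlib
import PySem

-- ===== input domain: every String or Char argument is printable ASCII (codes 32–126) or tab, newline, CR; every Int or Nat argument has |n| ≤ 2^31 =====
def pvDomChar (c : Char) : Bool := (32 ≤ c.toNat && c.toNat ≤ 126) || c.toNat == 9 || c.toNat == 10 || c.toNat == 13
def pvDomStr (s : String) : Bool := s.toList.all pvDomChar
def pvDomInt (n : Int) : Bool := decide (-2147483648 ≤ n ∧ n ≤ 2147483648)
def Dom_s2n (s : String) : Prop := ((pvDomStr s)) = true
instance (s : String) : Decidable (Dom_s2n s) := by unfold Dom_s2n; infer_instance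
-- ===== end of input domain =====

-- B replaces OR-ing 1<<i at an enumerate index by Horner accumulation n = 2n+bit over the
-- reversed string (alternative decomposition, same asymptotic cost).

-- ===== PORT A =====
-- literal port of A: fold over enumerate(s); 'n |= 1 << i' is Int.lor with a shift by the
-- Int index; the assert branch leaves n unchanged (assert failures are excluded by Pre_).
def s2n (s : String) : Int :=
  (PySem.List.enumerate s.toList).foldl
    (fun n ic => if ic.2 = '#' then Int.lor n ((1 : Int) <<< ic.1) else n) 0

-- ===== PORT B =====
-- literal port of B: fold over the reversed character list with Horner step 2*n+bit
-- (the assert branch computes 2*n; assert failures are excluded by Pre_).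
def s2n_alt (s : String) : Int :=
  s.toList.reverse.foldl (fun n c => if c = '#' then 2 * n + 1 else 2 * n) 0

-- ===== PRECONDITION & SPEC =====
-- Pre_ excludes strings containing any character other than '#' or '.', on which Python A
-- (and B) raise AssertionError.
def Pre_s2n (s : String) : Prop := s.toList.all (fun c => c == '#' || c == '.') = true
instance (s : String) : Decidable (Pre_s2n s) := by unfold Pre_s2n; infer_instance
def pvWitness_s2n : String := "#.##."
def Spec_s2n (s : String) (out : Int) : Prop := out = s2n_alt s
instance (s : String) (out : Int) : Decidable (Spec_s2n s out) := by unfold Spec_s2n; infer_instance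

-- ===== CLAIM (what is proved, stated in full; the proofs are below) =====
def Claim_equal_s2n : Prop := ∀ (s : String), Dom_s2n s → Pre_s2n s → Spec_s2n s (s2n s)

-- ===== LEMMAS AND PROOFS =====

-- the common value: little-endian bit value of the character list
def pvValN : List Char → Nat
  | [] => 0
  | c :: t => (if c = '#' then 1 else 0) + 2 * pvValN t

theorem pv_lor_two_pow_of_lt (k m : Nat) (h : m < 2^k) : m ||| 2^k = m + 2^k := by
  apply Nat.eq_of_testBit_eq
  intro i
  rcases lt_trichotomy i k with hi | rfl | hi
  · rw [Nat.testBit_lor, Nat.testBit_two_pow_of_ne (by omega : k ≠ i),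
      Nat.add_comm, Nat.testBit_two_pow_add_gt hi, Bool.or_false]
  · have h1 : (m + 2^i).testBit i = true := by
      rw [Nat.add_comm, Nat.testBit_two_pow_add_eq]
      simp [Nat.testBit_lt_two_pow h]
    simp [h1]
  · have hb : (m + 2^k).testBit i = false :=
      Nat.testBit_eq_false_of_lt (by
        have : 2^(k+1) ≤ 2^i := Nat.pow_le_pow_right (by omega) (by omega)
        have := Nat.pow_succ 2 k; omega)
    rw [Nat.testBit_lor, hb, Nat.testBit_two_pow_of_ne (by omega : k ≠ i),
      Nat.testBit_eq_false_of_lt (lt_of_lt_of_le h (Nat.pow_le_pow_right (by omega) (by omega)))]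
    rfl

theorem pv_one_shift (k : Nat) : (1 : Int) <<< ((k : Nat) : Int) = ((2^k : Nat) : Int) := by
  rw [show (1 : Int) = ((1 : Nat) : Int) from rfl, Int.shiftLeft_natCast]
  simp [Nat.shiftLeft_eq]

-- loop invariant for A's fold: accumulator m < 2^k before processing index k
theorem pv_A_loop (l : List Char) : ∀ (k m : Nat), m < 2^k →
    (PySem.List.enumerate l (k : Int)).foldl
      (fun n ic => if ic.2 = '#' then Int.lor n ((1 : Int) <<< ic.1) else n) (m : Int)
    = ((m + 2^k * pvValN l : Nat) : Int) := by
  induction l with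
  | nil => intro k m _; simp [PySem.List.enumerate_nil, pvValN]
  | cons c t ih =>
    intro k m h
    rw [PySem.List.enumerate_cons, List.foldl_cons]
    by_cases hc : c = '#'
    · simp only [hc, if_true]
      rw [pv_one_shift k, show Int.lor (m : Int) ((2^k : Nat) : Int) = ((m ||| 2^k : Nat) : Int) from rfl,
        pv_lor_two_pow_of_lt k m h,
        show ((k : Int) + 1) = (((k+1 : Nat)) : Int) by push_cast; ring,
        ih (k+1) (m + 2^k) (by have := Nat.pow_succ 2 k; omega)]
      congr 1
      simp [pvValN, Nat.pow_succ]; ring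
    · simp only [if_neg hc]
      rw [show ((k : Int) + 1) = (((k+1 : Nat)) : Int) by push_cast; ring,
        ih (k+1) m (lt_of_lt_of_le h (Nat.pow_le_pow_right (by omega) (by omega)))]
      congr 1
      simp [pvValN, hc, Nat.pow_succ]; ring

-- B's fold over the reversed list computes the same value (Horner)
theorem pv_B_loop (l : List Char) : ∀ (n : Nat),
    l.reverse.foldl (fun n c => if c = '#' then 2 * n + 1 else 2 * n) ((n : Nat) : Int)
    = ((n * 2^l.length + pvValN l : Nat) : Int) := by
  induction l with
  | nil => intro n; simp [pvValN]
  | cons c t ih =>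
    intro n
    rw [List.reverse_cons, List.foldl_append, ih n, List.foldl_cons, List.foldl_nil]
    by_cases hc : c = '#' <;>
      simp only [hc, reduceIte] <;>
      push_cast <;> simp [pvValN, hc] <;> ring

-- ===== VERDICT (by name: the statement is the Claim_ definition above) =====
theorem s2n_spec : Claim_equal_s2n := by
  intro s _ _
  unfold Spec_s2n s2n s2n_alt
  have hA := pv_A_loop s.toList 0 0 (by norm_num)
  have hB := pv_B_loop s.toList 0
  simp only [Nat.cast_zero] at hA hB
  rw [show PySem.List.enumerate s.toList = PySem.List.enumerate s.toList 0 from rfl, hA, hB]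
  simp
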